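-- pv_equiv track=rewrite | github.com/radovanbauer/eulerPython | Problem704.py | S2
-- ===== SOURCE A (Python) =====
-- def fact_pow2(n):
--     res = 0
--     pow2 = 2
--     while pow2 <= n:
--         res += n // pow2
--         pow2 *= 2
--     return res
--
-- def S2(n):
--     if n == 0:
--         return 0
--     maxp2 = 1
--     a = 0
--     while maxp2 * 2 <= n:
--         maxp2 *= 2
--         a += 1
--     m = n - maxp2 + 1
--     return 2**a * (a - 3) + 3 + (m + 1) * a - fact_pow2(m)
-- ===== SOURCE B (Python) =====
-- def S2(n):
--     # Closed form: a = floor(log2 n) via bit_length, and v2(m!) = m - popcount(m) (Legendre).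
--     if n <= 0:
--         return 0
--     a = n.bit_length() - 1
--     p = 2 ** a
--     m = n - p + 1
--     return p * (a - 3) + 3 + (m + 1) * a - (m - bin(m).count('1'))
-- ===== Notes on version B (the rewrite author's own statement) =====
-- stated objective: simpler
-- what changed: Both while-loops are replaced by closed forms: a = n.bit_length()-1 gives the largest power of two, and Legendre's identity v2(m!) = m - popcount(m) replaces the fact_pow2 summation loop.
import Mathlib
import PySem

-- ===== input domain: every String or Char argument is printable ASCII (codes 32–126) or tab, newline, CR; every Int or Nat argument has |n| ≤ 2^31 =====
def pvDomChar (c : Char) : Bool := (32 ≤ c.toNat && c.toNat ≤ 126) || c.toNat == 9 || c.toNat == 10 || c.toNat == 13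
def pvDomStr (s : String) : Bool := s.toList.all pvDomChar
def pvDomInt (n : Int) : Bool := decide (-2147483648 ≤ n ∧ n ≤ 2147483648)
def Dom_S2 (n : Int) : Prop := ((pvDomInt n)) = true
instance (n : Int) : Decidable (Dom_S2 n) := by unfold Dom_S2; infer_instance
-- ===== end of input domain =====

-- B replaces A's two while-loops by closed forms (bit_length and Legendre's v2(m!) = m - popcount m): simpler, no loops.


-- ===== PORT A =====
-- while pow2 <= n: res += n // pow2; pow2 *= 2   (the '0 < pow2' conjunct is only a
-- termination guard; pow2 starts at 2 and stays positive, so it never changes behaviour)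
def factPow2Loop (n res pow2 : Int) : Int :=
  if _h : pow2 ≤ n ∧ 0 < pow2 then
    factPow2Loop n (res + PySem.Int.floordiv n pow2) (pow2 * 2)
  else res
termination_by (n + 1 - pow2).toNat
decreasing_by all_goals omega

-- while maxp2 * 2 <= n: maxp2 *= 2; a += 1   (same remark about '0 < maxp2')
def S2Loop (n maxp2 a : Int) : Int × Int :=
  if _h : maxp2 * 2 ≤ n ∧ 0 < maxp2 then S2Loop n (maxp2 * 2) (a + 1)
  else (maxp2, a)
termination_by (n + 1 - maxp2).toNat
decreasing_by all_goals omega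

def S2 (n : Int) : Int :=
  if n = 0 then 0
  else
    let p := S2Loop n 1 0
    let a := p.2
    let m := n - p.1 + 1
    -- 2**a: a is a loop counter, always ≥ 0, so 2 ^ a.toNat is exact
    2 ^ a.toNat * (a - 3) + 3 + (m + 1) * a - factPow2Loop m 0 2

-- ===== PORT B =====
-- n.bit_length() → PySem.Int.bitLength; bin(m).count('1') → PySem.Int.bitCount (exact here: m ≥ 1)
def S2_alt (n : Int) : Int :=
  if n ≤ 0 then 0
  else
    let a : Int := (PySem.Int.bitLength n : Int) - 1
    let p : Int := 2 ^ a.toNat   -- 2 ** a, a ≥ 0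
    let m := n - p + 1
    p * (a - 3) + 3 + (m + 1) * a - (m - (PySem.Int.bitCount m : Int))

-- ===== PRECONDITION & SPEC =====
def Spec_S2 (n : Int) (out : Int) : Prop := out = S2_alt n
instance (n : Int) (out : Int) : Decidable (Spec_S2 n out) := by unfold Spec_S2; infer_instance

-- ===== CLAIM (what is proved, stated in full; the proofs are below) =====
def Claim_equal_S2 : Prop := ∀ (n : Int), Dom_S2 n → Spec_S2 n (S2 n)

-- ===== LEMMAS AND PROOFS =====

theorem factPow2Loop_add (n res pow2 : Int) :
    factPow2Loop n res pow2 = res + factPow2Loop n 0 pow2 := by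
  rw [factPow2Loop.eq_def n res pow2, factPow2Loop.eq_def n 0 pow2]
  by_cases h : pow2 ≤ n ∧ 0 < pow2
  · rw [dif_pos h, dif_pos h,
      factPow2Loop_add n (res + PySem.Int.floordiv n pow2) (pow2 * 2),
      factPow2Loop_add n (0 + PySem.Int.floordiv n pow2) (pow2 * 2)]
    ring
  · rw [dif_neg h, dif_neg h]; ring
termination_by (n + 1 - pow2).toNat
decreasing_by all_goals omega

theorem factPow2Loop_halve (n res p : Int) (hp : 1 ≤ p) (hn : 0 ≤ n) :
    factPow2Loop n res (2 * p) = factPow2Loop (n / 2) res p := by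
  have hg : (2 * p ≤ n ∧ 0 < 2 * p) ↔ (p ≤ n / 2 ∧ 0 < p) := by
    constructor
    · rintro ⟨h1, h2⟩
      exact ⟨(Int.le_ediv_iff_mul_le (by omega : (0:Int) < 2)).2 (by omega), by omega⟩
    · rintro ⟨h1, h2⟩
      have := (Int.le_ediv_iff_mul_le (by omega : (0:Int) < 2)).1 h1
      exact ⟨by omega, by omega⟩
  rw [factPow2Loop.eq_def n res (2 * p), factPow2Loop.eq_def (n / 2) res p]
  by_cases h : p ≤ n / 2 ∧ 0 < p
  · rw [dif_pos (hg.2 h), dif_pos h]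
    have hfd : PySem.Int.floordiv n (2 * p) = PySem.Int.floordiv (n / 2) p := by
      rw [PySem.Int.floordiv_eq_ediv_of_pos (by omega : (0:Int) < 2 * p),
          PySem.Int.floordiv_eq_ediv_of_pos (by omega : (0:Int) < p),
          ← Int.ediv_ediv_of_nonneg (by omega : (0:Int) ≤ 2)]
    have e : 2 * p * 2 = 2 * (p * 2) := by ring
    rw [hfd, e, factPow2Loop_halve n _ (p * 2) (by omega) hn]
  · rw [dif_neg (fun hc => h (hg.1 hc)), dif_neg h]
termination_by (n + 1 - p).toNat
decreasing_by all_goals omega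

theorem legendre (n : Int) (hn : 0 ≤ n) :
    factPow2Loop n 0 2 = n - PySem.Int.bitCount n := by
  by_cases h0 : n = 0
  · subst h0
    rw [factPow2Loop.eq_def 0 0 2, dif_neg (by omega)]
    decide
  · by_cases h2 : 2 ≤ n
    · have h := factPow2Loop_halve n 0 1 le_rfl hn
      norm_num at h
      rw [h, factPow2Loop.eq_def (n / 2) 0 1, dif_pos (by constructor <;> omega)]
      rw [PySem.Int.floordiv_eq_ediv_of_pos (by omega : (0:Int) < 1)]
      rw [factPow2Loop_add]
      norm_num
      rw [legendre (n / 2) (by omega)]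
      have hbc := PySem.Int.bitCount_of_pos (n := n) (by omega)
      rw [PySem.Int.floordiv_eq_ediv_of_pos (by omega : (0:Int) < 2),
          PySem.Int.mod_eq_emod_of_pos (by omega : (0:Int) < 2)] at hbc
      rw [hbc]
      push_cast
      omega
    · have h1 : n = 1 := by omega
      subst h1
      rw [factPow2Loop.eq_def 1 0 2, dif_neg (by omega)]
      decide
termination_by n.toNat
decreasing_by all_goals omega

theorem S2Loop_offset (n p a : Int) :
    S2Loop n p a = ((S2Loop n p 0).1, a + (S2Loop n p 0).2) := by
  rw [S2Loop.eq_def n p a, S2Loop.eq_def n p 0]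
  by_cases h : p * 2 ≤ n ∧ 0 < p
  · rw [dif_pos h, dif_pos h, S2Loop_offset n (p * 2) (a + 1), S2Loop_offset n (p * 2) (0 + 1)]
    simp [Prod.ext_iff]
    omega
  · rw [dif_neg h, dif_neg h]
    simp
termination_by (n + 1 - p).toNat
decreasing_by all_goals omega

theorem S2Loop_halve (n p a : Int) (hp : 1 ≤ p) (hn : 0 ≤ n) :
    S2Loop n (2 * p) a = ((S2Loop (n / 2) p a).1 * 2, (S2Loop (n / 2) p a).2) := by
  have hg : (2 * p * 2 ≤ n ∧ 0 < 2 * p) ↔ (p * 2 ≤ n / 2 ∧ 0 < p) := by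
    constructor
    · rintro ⟨h1, h2⟩
      exact ⟨(Int.le_ediv_iff_mul_le (by omega : (0:Int) < 2)).2 (by omega), by omega⟩
    · rintro ⟨h1, h2⟩
      have := (Int.le_ediv_iff_mul_le (by omega : (0:Int) < 2)).1 h1
      exact ⟨by omega, by omega⟩
  rw [S2Loop.eq_def n (2 * p) a, S2Loop.eq_def (n / 2) p a]
  by_cases h : p * 2 ≤ n / 2 ∧ 0 < p
  · rw [dif_pos (hg.2 h), dif_pos h]
    have e : 2 * p * 2 = 2 * (p * 2) := by ring
    rw [e, S2Loop_halve n (p * 2) (a + 1) (by omega) hn]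
  · rw [dif_neg (fun hc => h (hg.1 hc)), dif_neg h]
    simp [Prod.ext_iff]
    ring
termination_by (n + 1 - p).toNat
decreasing_by all_goals omega

theorem S2Loop_char (n : Int) (hn : 1 ≤ n) :
    S2Loop n 1 0 = ((2 : Int) ^ (PySem.Int.bitLength n - 1), (PySem.Int.bitLength n : Int) - 1) := by
  rw [S2Loop.eq_def n 1 0]
  by_cases h2 : 2 ≤ n
  · rw [dif_pos (by constructor <;> omega)]
    have e1 : (1 : Int) * 2 = 2 * 1 := by ring
    rw [e1, S2Loop_halve n 1 (0 + 1) le_rfl (by omega),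
        S2Loop_offset (n / 2) 1 (0 + 1), S2Loop_char (n / 2) (by omega)]
    have hb : PySem.Int.bitLength n = PySem.Int.bitLength (n / 2) + 1 := by
      have h := PySem.Int.bitLength_of_pos (n := n) (by omega)
      rwa [PySem.Int.floordiv_eq_ediv_of_pos (by omega : (0:Int) < 2)] at h
    have hb1 : 1 ≤ PySem.Int.bitLength (n / 2) := by
      have := PySem.Int.bitLength_of_pos (n := n / 2) (by omega)
      omega
    rw [hb]
    simp only [Prod.ext_iff]
    constructor
    · have e2 : PySem.Int.bitLength (n / 2) + 1 - 1 = (PySem.Int.bitLength (n / 2) - 1) + 1 := by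
        omega
      rw [e2, pow_succ]
    · push_cast
      omega
  · rw [dif_neg (by omega)]
    have h1 : n = 1 := by omega
    subst h1
    decide
termination_by n.toNat
decreasing_by all_goals omega

-- ===== VERDICT (by name: the statement is the Claim_ definition above) =====
theorem S2_spec : Claim_equal_S2 := by
  unfold Claim_equal_S2 Spec_S2
  intro n _
  by_cases h0 : n = 0
  · subst h0
    simp [S2, S2_alt]
  · by_cases hneg : n < 0
    · have hf : ∀ m : Int, m ≤ 1 → factPow2Loop m 0 2 = 0 := by
        intro m hm
        rw [factPow2Loop.eq_def, dif_neg (by omega)]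
      have hA : S2 n = 0 := by
        unfold S2
        rw [if_neg h0, S2Loop.eq_def n 1 0, dif_neg (by omega)]
        norm_num [hf n (by omega), hf (n - 1 + 1) (by omega)]
      have hB : S2_alt n = 0 := by
        unfold S2_alt
        rw [if_pos (by omega)]
      rw [hA, hB]
    · have h1 : 1 ≤ n := by omega
      have hLpos : 1 ≤ PySem.Int.bitLength n := by
        have := PySem.Int.bitLength_of_pos (n := n) (by omega)
        omega
      have htn : ((PySem.Int.bitLength n : Int) - 1).toNat = PySem.Int.bitLength n - 1 := by
        omega
      have hle : (2 : Int) ^ (PySem.Int.bitLength n - 1) ≤ n := by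
        have h := PySem.Int.two_pow_bitLength_le (n := n) (by omega)
        have h2 : ((2 ^ (PySem.Int.bitLength n - 1) : Nat) : Int) ≤ (n.natAbs : Int) := by
          exact_mod_cast h
        rw [Int.natAbs_of_nonneg (by omega : (0:Int) ≤ n)] at h2
        calc (2:Int) ^ (PySem.Int.bitLength n - 1)
            = ((2 ^ (PySem.Int.bitLength n - 1) : Nat) : Int) := by push_cast; ring
          _ ≤ n := h2
      have hm : 1 ≤ n - 2 ^ (PySem.Int.bitLength n - 1) + 1 := by omega
      unfold S2 S2_alt
      rw [if_neg h0, if_neg (by omega : ¬ n ≤ 0), S2Loop_char n h1]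
      simp only [htn]
      rw [legendre (n - 2 ^ (PySem.Int.bitLength n - 1) + 1) (by omega)]
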